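-- pv_equiv track=rewrite | github.com/corydodt/Playtools | playtools/util.py | rdfName
-- ===== SOURCE A (Python) =====
-- def rdfName(s):
--     """Return a string suitable for an IRI from s"""
--     s = s.replace('.', ' ')
--     s = s.replace('-', ' ')
--     s = s.replace("'", '')
--     s = s.replace('/', ' ')
--     s = s.replace(':', ' ')
--     s = s.replace(',', ' ')
--     s = s.replace('+', ' ')
--     s = s.replace('(', ' ').replace(")", ' ')
--     s = s.replace('[', ' ').replace("]", ' ')
--     parts = s.split()
--     parts[0] = parts[0].lower()
--     parts[1:] = [p.capitalize() for p in parts[1:]]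
--     ret = ''.join(parts)
--     if ret[0].isdigit(): ret = '_' + ret
--     return ret
-- ===== SOURCE B (Python) =====
-- def rdfName(s):
--     """Return a string suitable for an IRI from s (single-pass tokenizer)."""
--     SEPS = ".-/:,+()[]"
--     words = []
--     buf = []
--     for c in s:
--         if c == "'":
--             continue
--         if c in SEPS or c.isspace():
--             if buf:
--                 words.append(''.join(buf))
--                 buf = []
--         else:
--             buf.append(c)
--     if buf:
--         words.append(''.join(buf))
--     ret = words[0].lower()
--     for w in words[1:]:
--         ret += w[:1].upper() + w[1:].lower()
--     if ret[0].isdigit():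
--         ret = '_' + ret
--     return ret
-- ===== Notes on version B (the rewrite author's own statement) =====
-- stated objective: alternative
-- what changed: Replaces the ten-pass replace-then-split pipeline by a single left-to-right pass that tokenizes the string directly (separator chars and whitespace flush a word buffer, apostrophes are skipped), then lowercases the first word and capitalizes the rest in one accumulation loop; asymptotically O(n) in one pass instead of eleven, though CPython's C-level str.replace makes A faster in wall-clock terms.
import Mathlib
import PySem

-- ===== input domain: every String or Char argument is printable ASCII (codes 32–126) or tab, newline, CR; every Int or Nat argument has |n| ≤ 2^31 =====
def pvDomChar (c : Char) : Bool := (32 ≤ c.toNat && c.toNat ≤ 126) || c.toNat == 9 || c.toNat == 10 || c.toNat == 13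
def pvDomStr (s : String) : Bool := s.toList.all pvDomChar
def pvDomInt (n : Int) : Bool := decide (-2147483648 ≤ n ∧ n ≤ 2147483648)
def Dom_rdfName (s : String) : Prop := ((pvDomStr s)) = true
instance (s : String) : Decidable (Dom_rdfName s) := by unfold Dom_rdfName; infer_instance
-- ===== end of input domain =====

-- B replaces A's ten replace passes + split by ONE tokenizing pass over the string; same
-- return value everywhere A returns (proved below); not faster in CPython (C-level replaces).

-- ===== PORT A =====
-- str.capitalize for the ASCII domain: first char uppercased, rest lowercased (exact on ASCII)
def pyCapitalize (cs : List Char) : List Char :=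
  match cs with
  | [] => []
  | c :: t => PySem.Chars.upperChar c :: PySem.Chars.lower t

def rdfName (s : String) : String :=
  let cs := s.toList
  let c1 := PySem.Chars.replace cs ['.'] [' ']
  let c2 := PySem.Chars.replace c1 ['-'] [' ']
  let c3 := PySem.Chars.replace c2 ['\''] []
  let c4 := PySem.Chars.replace c3 ['/'] [' ']
  let c5 := PySem.Chars.replace c4 [':'] [' ']
  let c6 := PySem.Chars.replace c5 [','] [' ']
  let c7 := PySem.Chars.replace c6 ['+'] [' ']
  let c8 := PySem.Chars.replace (PySem.Chars.replace c7 ['('] [' ']) [')'] [' ']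
  let c9 := PySem.Chars.replace (PySem.Chars.replace c8 ['['] [' ']) [']'] [' ']
  let parts := PySem.Chars.split₀ c9
  match parts with
  | [] => ""  -- Python raises IndexError at parts[0] here; excluded by Pre_rdfName
  | p0 :: rest =>
    let ret := PySem.Chars.join [] (PySem.Chars.lower p0 :: rest.map pyCapitalize)
    match PySem.List.pyGet? ret 0 with
    | none => String.mk ret  -- Python raises IndexError at ret[0]; unreachable when parts ≠ []
    | some c => if PySem.Chars.isdigit c then String.mk ('_' :: ret) else String.mk ret

-- ===== PORT B =====
def sepsB : List Char := ['.', '-', '/', ':', ',', '+', '(', ')', '[', ']']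

-- the for-loop of Source B: buf is the current word, words the completed words, both in order
def tokGo : List Char → List Char → List (List Char) → List (List Char)
  | [], buf, words => if buf.isEmpty then words else words ++ [buf]
  | c :: rest, buf, words =>
    if c = '\'' then tokGo rest buf words
    else if c ∈ sepsB || PySem.Chars.isspace c then
      (if buf.isEmpty then tokGo rest [] words else tokGo rest [] (words ++ [buf]))
    else tokGo rest (buf ++ [c]) words

def rdfName_alt (s : String) : String :=
  let words := tokGo s.toList [] []
  match words with
  | [] => ""  -- Python raises IndexError at words[0] here; excluded by Pre_rdfName
  | w0 :: rest =>
    let ret := rest.foldl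
      (fun r w => r ++ PySem.Chars.upper (PySem.Chars.slice w none (some 1))
                    ++ PySem.Chars.lower (PySem.Chars.slice w (some 1) none))
      (PySem.Chars.lower w0)
    match PySem.List.pyGet? ret 0 with
    | none => String.mk ret  -- Python raises IndexError at ret[0]; unreachable when words ≠ []
    | some c => if PySem.Chars.isdigit c then String.mk ('_' :: ret) else String.mk ret

-- ===== PRECONDITION & SPEC =====
-- Pre_ excludes exactly the inputs with no token at all (every char is a separator, whitespace
-- or an apostrophe): there the Python A raises IndexError at parts[0] and returns nothing.
def Pre_rdfName (s : String) : Prop :=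
  (s.toList.any (fun c => !(c ∈ sepsB || PySem.Chars.isspace c || c = '\''))) = true
instance (s : String) : Decidable (Pre_rdfName s) := by unfold Pre_rdfName; infer_instance

def pvWitness_rdfName : String := "3rd Level's (stuff)"

def Spec_rdfName (s : String) (out : String) : Prop := out = rdfName_alt s
instance (s : String) (out : String) : Decidable (Spec_rdfName s out) := by unfold Spec_rdfName; infer_instance

-- ===== CLAIM (what is proved, stated in full; the proofs are below) =====
def Claim_equal_rdfName : Prop := ∀ (s : String), Dom_rdfName s → Pre_rdfName s → Spec_rdfName s (rdfName s)

-- ===== LEMMAS AND PROOFS =====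

-- the per-character effect of A's replace chain
def normChar (c : Char) : List Char :=
  if c ∈ sepsB then [' '] else if c = '\'' then [] else [c]

-- single-character str.replace is a flatMap
theorem replace_go_single (a : Char) (new : List Char) :
    ∀ (cs : List Char) (fuel : Nat) (acc : List Char), cs.length ≤ fuel →
      PySem.Chars.replace.go [a] new fuel cs acc
        = acc.reverse ++ cs.flatMap (fun c => if c = a then new else [c]) := by
  intro cs
  induction cs with
  | nil =>
    intro fuel acc _
    cases fuel <;> simp [PySem.Chars.replace.go]
  | cons c t ih =>
    intro fuel acc hle
    cases fuel with
    | zero => simp at hle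
    | succ fuel =>
      by_cases h : a = c
      · subst h
        have hb : ([a].isPrefixOf (a :: t)) = true := by simp [List.isPrefixOf]
        simp only [PySem.Chars.replace.go, hb, if_pos]
        rw [show List.drop [a].length (a::t) = t by simp]
        rw [ih fuel (new.reverse ++ acc) (by simpa using Nat.le_of_succ_le_succ hle)]
        simp
      · have hb : ([a].isPrefixOf (c :: t)) = false := by
          simp [List.isPrefixOf]
          exact h
        simp only [PySem.Chars.replace.go, hb, Bool.false_eq_true, if_false]
        rw [ih fuel (c :: acc) (by simpa using Nat.le_of_succ_le_succ hle)]
        simp [if_neg (Ne.symm h)]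

theorem replace_single (cs : List Char) (a : Char) (new : List Char) :
    PySem.Chars.replace cs [a] new = cs.flatMap (fun c => if c = a then new else [c]) := by
  simp only [PySem.Chars.replace, List.isEmpty_cons, Bool.false_eq_true, if_false]
  exact replace_go_single a new cs cs.length [] (Nat.le_refl _)

-- the whole replace chain of A, per character
theorem chain_eq (cs : List Char) :
    (PySem.Chars.replace (PySem.Chars.replace
      (PySem.Chars.replace (PySem.Chars.replace
        (PySem.Chars.replace (PySem.Chars.replace (PySem.Chars.replace
          (PySem.Chars.replace (PySem.Chars.replace (PySem.Chars.replace
            (PySem.Chars.replace cs ['.'] [' ']) ['-'] [' ']) ['\''] []) ['/'] [' '])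
            [':'] [' ']) [','] [' ']) ['+'] [' ']) ['('] [' ']) [')'] [' '])
            ['['] [' ']) [']'] [' '])
    = cs.flatMap normChar := by
  simp only [replace_single, List.flatMap_assoc]
  apply List.flatMap_congr
  intro c _
  simp only [normChar, sepsB]
  by_cases h1 : c = '.' <;> by_cases h2 : c = '-' <;> by_cases h3 : c = '\'' <;>
    by_cases h4 : c = '/' <;> by_cases h5 : c = ':' <;> by_cases h6 : c = ',' <;>
    by_cases h7 : c = '+' <;> by_cases h8 : c = '(' <;> by_cases h9 : c = ')' <;>
    by_cases h10 : c = '[' <;> by_cases h11 : c = ']' <;>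
    simp_all <;> decide

-- B's tokenizer computes split() of the replaced string
theorem tok_eq_split_go :
    ∀ (cs buf : List Char) (words : List (List Char)),
      PySem.Chars.split₀.go (cs.flatMap normChar) buf.reverse words.reverse
        = tokGo cs buf words := by
  intro cs
  induction cs with
  | nil =>
    intro buf words
    by_cases h : buf.isEmpty <;>
      simp_all [tokGo, PySem.Chars.split₀.go]
  | cons c rest ih =>
    intro buf words
    by_cases hsep : c ∈ sepsB
    · have hn : normChar c = [' '] := by simp [normChar, hsep]
      have hc : c ≠ '\'' := by
        revert hsep; simp [sepsB]; rintro (h|h|h|h|h|h|h|h|h|h) <;> simp [h]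
      simp only [List.flatMap_cons, hn, List.singleton_append, tokGo, if_neg hc, hsep,
        decide_true, Bool.true_or, if_pos]
      by_cases hb : buf.isEmpty
      · have hb' : buf = [] := by simpa using hb
        subst hb'
        simp only [PySem.Chars.split₀.go, show PySem.Chars.isspace ' ' = true by decide, if_pos,
          List.reverse_nil, List.isEmpty_nil]
        simpa using ih [] words
      · have hbr : buf.reverse.isEmpty = false := by simp_all
        simp only [PySem.Chars.split₀.go, show PySem.Chars.isspace ' ' = true by decide, if_pos,
          hbr, Bool.false_eq_true, if_false, if_neg (by simp_all : ¬ buf.isEmpty = true)]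
        rw [show (buf.reverse.reverse :: words.reverse) = (words ++ [buf]).reverse by simp]
        exact ih [] (words ++ [buf])
    · by_cases hc : c = '\''
      · subst hc
        have hn : normChar '\'' = [] := by decide
        simp only [List.flatMap_cons, hn, List.nil_append, tokGo, if_pos rfl]
        exact ih buf words
      · have hn : normChar c = [c] := by simp [normChar, hsep, hc]
        simp only [List.flatMap_cons, hn, List.singleton_append, tokGo, if_neg hc, hsep,
          decide_false, Bool.false_or]
        by_cases hsp : PySem.Chars.isspace c = true
        · simp only [PySem.Chars.split₀.go, hsp, if_pos]
          by_cases hb : buf.isEmpty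
          · have hb' : buf = [] := by simpa using hb
            subst hb'
            simp only [List.reverse_nil, List.isEmpty_nil, if_pos]
            simpa using ih [] words
          · have hbr : buf.reverse.isEmpty = false := by simp_all
            simp only [hbr, Bool.false_eq_true, if_false,
              if_neg (by simp_all : ¬ buf.isEmpty = true)]
            rw [show (buf.reverse.reverse :: words.reverse) = (words ++ [buf]).reverse by simp]
            exact ih [] (words ++ [buf])
        · have hsp' : PySem.Chars.isspace c = false := by simp_all
          simp only [PySem.Chars.split₀.go, hsp', Bool.false_eq_true, if_false]
          rw [show (c :: buf.reverse) = (buf ++ [c]).reverse by simp]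
          exact ih (buf ++ [c]) words

theorem tok_eq_split (cs : List Char) :
    PySem.Chars.split₀ (cs.flatMap normChar) = tokGo cs [] [] := by
  simpa [PySem.Chars.split₀] using tok_eq_split_go cs [] []

-- ''.join is flatten
theorem join_nil_eq_flatten (l : List (List Char)) : PySem.Chars.join [] l = l.flatten := by
  simp only [PySem.Chars.join, List.intercalate]
  induction l with
  | nil => simp
  | cons h t ih => cases t <;> simp_all [List.intersperse]

-- Source B's w[:1].upper() + w[1:].lower() is A's capitalize
theorem cap_eq (w : List Char) :
    PySem.Chars.upper (PySem.Chars.slice w none (some 1))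
      ++ PySem.Chars.lower (PySem.Chars.slice w (some 1) none) = pyCapitalize w := by
  cases w with
  | nil => simp [PySem.Chars.slice_eq_listSlice, PySem.List.slice_to, PySem.List.slice_from,
      pyCapitalize, PySem.Chars.upper, PySem.Chars.lower]
  | cons c t => simp [PySem.Chars.slice_eq_listSlice, PySem.List.slice_to, PySem.List.slice_from,
      pyCapitalize, PySem.Chars.upper, PySem.Chars.lower]

-- ===== VERDICT (by name: the statement is the Claim_ definition above) =====
theorem rdfName_spec : Claim_equal_rdfName := by
  intro s _ _
  unfold Spec_rdfName
  simp only [rdfName, rdfName_alt]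
  rw [chain_eq, tok_eq_split]
  cases h : tokGo s.toList [] [] with
  | nil => rfl
  | cons w0 rest =>
    have hret : PySem.Chars.join [] (PySem.Chars.lower w0 :: rest.map pyCapitalize)
        = rest.foldl
            (fun r w => r ++ PySem.Chars.upper (PySem.Chars.slice w none (some 1))
                          ++ PySem.Chars.lower (PySem.Chars.slice w (some 1) none))
            (PySem.Chars.lower w0) := by
      rw [join_nil_eq_flatten]
      have : (fun (r : List Char) (w : List Char) =>
          r ++ PySem.Chars.upper (PySem.Chars.slice w none (some 1))
            ++ PySem.Chars.lower (PySem.Chars.slice w (some 1) none))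
          = fun r w => r ++ pyCapitalize w := by
        funext r w
        rw [List.append_assoc, cap_eq]
      rw [this, PySem.List.foldl_append_eq_flatMap]
      simp [List.flatMap_def]
    simp only [hret]
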